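-- pv_equiv track=rewrite | github.com/rocman/clawbot-playground | build_report.py | _hn_comment
-- ===== SOURCE A (Python) =====
-- def _hn_comment(title: str, pts: int, cmts: int) -> str:
--     """根据标题和互动数据生成一句点评"""
--     t = title.lower()
--     heat = pts + cmts * 2
--     # 热度标签
--     if heat > 5000:   hot = '🔥 超热议题'
--     elif heat > 2000: hot = '💬 热门讨论'
--     else:             hot = '📌 值得关注'
--     # 内容类型判断
--     if 'show hn' in t:      ctype = '社区展示项目'
--     elif 'ask hn' in t:     ctype = '社区提问'
--     elif any(w in t for w in ['release', 'launch', 'announce', 'introducing']): ctype = '新品发布'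
--     elif any(w in t for w in ['paper', 'research', 'study']): ctype = '研究论文'
--     elif any(w in t for w in ['vs', 'compare', 'benchmark']): ctype = '对比评测'
--     else:                   ctype = '行业资讯'
--     return f'{hot} · {ctype} · {pts} 赞 {cmts} 评'
-- ===== SOURCE B (Python) =====
-- # B: flat keyword->priority map scanned exhaustively; label = min matched priority (no short-circuit
-- # cascade); heat tier picked by arithmetic index = number of thresholds exceeded.
-- _KW_PRIO = {
--     'show hn': 0, 'ask hn': 1,
--     'release': 2, 'launch': 2, 'announce': 2, 'introducing': 2,
--     'paper': 3, 'research': 3, 'study': 3,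
--     'vs': 4, 'compare': 4, 'benchmark': 4,
-- }
-- _LABELS = ['社区展示项目', '社区提问', '新品发布', '研究论文', '对比评测', '行业资讯']
-- _HOT = ['📌 值得关注', '💬 热门讨论', '🔥 超热议题']
--
-- def _hn_comment(title: str, pts: int, cmts: int) -> str:
--     t = title.lower()
--     heat = pts + cmts * 2
--     hot = _HOT[(heat > 2000) + (heat > 5000)]
--     ctype = _LABELS[min((p for kw, p in _KW_PRIO.items() if kw in t), default=5)]
--     return f'{hot} · {ctype} · {pts} 赞 {cmts} 评'
-- ===== Notes on version B (the rewrite author's own statement) =====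
-- stated objective: alternative
-- what changed: Replaced the ordered short-circuiting if/elif keyword cascade by an exhaustive scan of a flat keyword-to-priority map aggregated with min (priority order becomes numeric, not control flow), and the heat cascade by an arithmetic tier index computed from booleans.
import Mathlib
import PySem

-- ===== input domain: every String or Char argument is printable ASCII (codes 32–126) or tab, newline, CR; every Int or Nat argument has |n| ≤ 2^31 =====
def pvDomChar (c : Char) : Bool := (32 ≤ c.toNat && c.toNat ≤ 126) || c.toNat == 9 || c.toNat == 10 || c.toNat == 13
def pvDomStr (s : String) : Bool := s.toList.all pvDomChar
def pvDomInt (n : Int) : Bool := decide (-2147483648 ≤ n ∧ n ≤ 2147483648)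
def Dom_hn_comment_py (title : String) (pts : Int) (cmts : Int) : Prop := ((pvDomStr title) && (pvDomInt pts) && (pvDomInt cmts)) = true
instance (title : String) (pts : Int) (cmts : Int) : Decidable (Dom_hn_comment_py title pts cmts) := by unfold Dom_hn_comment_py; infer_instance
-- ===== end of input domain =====

-- B replaces A's ordered if/elif cascades by a flat keyword→priority map scanned exhaustively with a
-- min-priority aggregation, and an arithmetic heat-tier index (alternative decomposition, same cost).


-- ===== PORT A =====
-- A's heat label: the if/elif cascade on heat
def pvHotA (heat : Int) : String :=
  if heat > 5000 then "🔥 超热议题"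
  else if heat > 2000 then "💬 热门讨论"
  else "📌 值得关注"

-- A's content-type label: the if/elif cascade of substring tests on the lowered title
def pvCtypeA (t : String) : String :=
  if PySem.Str.isIn "show hn" t then "社区展示项目"
  else if PySem.Str.isIn "ask hn" t then "社区提问"
  else if ["release", "launch", "announce", "introducing"].any (fun w => PySem.Str.isIn w t) then "新品发布"
  else if ["paper", "research", "study"].any (fun w => PySem.Str.isIn w t) then "研究论文"
  else if ["vs", "compare", "benchmark"].any (fun w => PySem.Str.isIn w t) then "对比评测"
  else "行业资讯"

def hn_comment_py (title : String) (pts : Int) (cmts : Int) : String :=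
  let t := PySem.Str.lower title
  let heat := pts + cmts * 2
  let hot := pvHotA heat
  let ctype := pvCtypeA t
  hot ++ " · " ++ ctype ++ " · " ++ PySem.Int.toStr pts ++ " 赞 " ++ PySem.Int.toStr cmts ++ " 评"

-- ===== PORT B =====
-- _KW_PRIO as an association list in insertion order
def pvKwPrio : List (String × Int) :=
  [("show hn", 0), ("ask hn", 1),
   ("release", 2), ("launch", 2), ("announce", 2), ("introducing", 2),
   ("paper", 3), ("research", 3), ("study", 3),
   ("vs", 4), ("compare", 4), ("benchmark", 4)]
def pvLabels : List String := ["社区展示项目", "社区提问", "新品发布", "研究论文", "对比评测", "行业资讯"]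
def pvHotList : List String := ["📌 值得关注", "💬 热门讨论", "🔥 超热议题"]

def hn_comment_py_alt (title : String) (pts : Int) (cmts : Int) : String :=
  let t := PySem.Str.lower title
  let heat := pts + cmts * 2
  -- _HOT[(heat > 2000) + (heat > 5000)]: the index is always 0..2, so the plain list index is exact
  let hot := pvHotList.getD ((if heat > 2000 then 1 else 0) + (if heat > 5000 then 1 else 0)) ""
  -- min((p for kw, p in _KW_PRIO.items() if kw in t), default=5)
  let best := (PySem.List.min? (pvKwPrio.filterMap (fun r => if PySem.Str.isIn r.1 t then some r.2 else none)) (fun x => x)).getD 5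
  -- _LABELS[best]: best is always 0..5, so the plain list index is exact
  let ctype := pvLabels.getD best.toNat ""
  hot ++ " · " ++ ctype ++ " · " ++ PySem.Int.toStr pts ++ " 赞 " ++ PySem.Int.toStr cmts ++ " 评"

-- ===== PRECONDITION & SPEC =====
def Spec_hn_comment_py (title : String) (pts : Int) (cmts : Int) (out : String) : Prop := out = hn_comment_py_alt title pts cmts
instance (title : String) (pts : Int) (cmts : Int) (out : String) : Decidable (Spec_hn_comment_py title pts cmts out) := by unfold Spec_hn_comment_py; infer_instance

-- ===== CLAIM (what is proved, stated in full; the proofs are below) =====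
def Claim_equal_hn_comment_py : Prop := ∀ (title : String) (pts : Int) (cmts : Int), Dom_hn_comment_py title pts cmts → Spec_hn_comment_py title pts cmts (hn_comment_py title pts cmts)

-- ===== LEMMAS AND PROOFS =====
theorem pv_hot_eq (heat : Int) :
    pvHotList.getD ((if heat > 2000 then 1 else 0) + (if heat > 5000 then 1 else 0)) "" = pvHotA heat := by
  unfold pvHotA pvHotList
  by_cases h1 : heat > 5000
  · have h2 : heat > 2000 := by omega
    simp [h1, h2]
  · by_cases h2 : heat > 2000 <;> simp [h1, h2]

set_option maxHeartbeats 4000000 in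
theorem pv_ctype_eq (t : String) :
    pvLabels.getD ((PySem.List.min? (pvKwPrio.filterMap (fun r : String × Int => if PySem.Str.isIn r.1 t then some r.2 else none)) (fun x : Int => x)).getD 5).toNat ""
      = pvCtypeA t := by
  unfold pvCtypeA pvKwPrio pvLabels
  simp only [List.filterMap, List.any_cons, List.any_nil, Bool.or_false]
  generalize PySem.Str.isIn "show hn" t = b1
  generalize PySem.Str.isIn "ask hn" t = b2
  generalize PySem.Str.isIn "release" t = b3
  generalize PySem.Str.isIn "launch" t = b4
  generalize PySem.Str.isIn "announce" t = b5
  generalize PySem.Str.isIn "introducing" t = b6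
  generalize PySem.Str.isIn "paper" t = b7
  generalize PySem.Str.isIn "research" t = b8
  generalize PySem.Str.isIn "study" t = b9
  generalize PySem.Str.isIn "vs" t = b10
  generalize PySem.Str.isIn "compare" t = b11
  generalize PySem.Str.isIn "benchmark" t = b12
  revert b1 b2 b3 b4 b5 b6 b7 b8 b9 b10 b11 b12
  decide

-- ===== VERDICT (by name: the statement is the Claim_ definition above) =====
theorem hn_comment_py_spec : Claim_equal_hn_comment_py := by
  intro title pts cmts _
  show hn_comment_py title pts cmts = hn_comment_py_alt title pts cmts
  dsimp only [hn_comment_py, hn_comment_py_alt]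
  rw [pv_hot_eq, pv_ctype_eq]
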